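-- pv_equiv track=rewrite | github.com/mccwdev/bip39-dutch-wordlist | create_wordlist.py | similar_words
-- ===== SOURCE A (Python) =====
-- SIMILAR = (
--     ('a', 'e'), ('a', 'o'),
--     ('b', 'd'), ('b', 'p'),
--     ('c', 'k'), ('c', 's'),
--     ('d', 'p'), ('d', 't'),
--     ('e', 'i'), ('e', 'o'),
--     ('f', 'v'),
--     ('i', 'j'), ('i', 'y'),
--     ('k', 'x'),
--     ('m', 'n'), ('m', 'w'),
--     ('n', 'u'),
--     ('o', 'u'),
--     ('s', 'x'), ('s', 'z'),
--     ('u', 'v'), ('u', 'w'),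
--     ('v', 'w'),
-- )
--
-- def similar_words(w1, w2):
--     # Find words containing similar characters
--     if len(w1) != len(w2):
--         return False
--     if w1 == w2:
--         return False
--
--     # Create list with character pairs from first and second word
--     diff = []
--     for i in range(len(w1)):
--         if w1[i] != w2[i]:
--             if w1[i] < w2[i]:
--                 pair = (w1[i], w2[i])
--             else:
--                 pair = (w2[i], w1[i])
--             diff.append(pair)
--
--     # Check if character pair is found in SIMILAR constant pair list
--     if len(diff) == 1:
--         if list(diff)[0] in SIMILAR:
--             return True
--     return False
-- ===== SOURCE B (Python) =====
-- SIMILAR = (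
--     ('a', 'e'), ('a', 'o'),
--     ('b', 'd'), ('b', 'p'),
--     ('c', 'k'), ('c', 's'),
--     ('d', 'p'), ('d', 't'),
--     ('e', 'i'), ('e', 'o'),
--     ('f', 'v'),
--     ('i', 'j'), ('i', 'y'),
--     ('k', 'x'),
--     ('m', 'n'), ('m', 'w'),
--     ('n', 'u'),
--     ('o', 'u'),
--     ('s', 'x'), ('s', 'z'),
--     ('u', 'v'), ('u', 'w'),
--     ('v', 'w'),
-- )
--
-- def similar_words(w1, w2):
--     # Locate the FIRST mismatching position; the rest must match exactly.
--     if len(w1) != len(w2):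
--         return False
--     for i in range(len(w1)):
--         if w1[i] != w2[i]:
--             if w1[i+1:] != w2[i+1:]:
--                 return False
--             return tuple(sorted((w1[i], w2[i]))) in SIMILAR
--     return False
-- ===== Notes on version B (the rewrite author's own statement) =====
-- stated objective: faster
-- what changed: A collects every mismatching character pair into a list and then tests len==1 and membership; B finds the first mismatch, verifies the suffixes are identical with one bulk slice compare, and tests the single sorted pair, exiting early on the second mismatch.
import Mathlib
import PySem

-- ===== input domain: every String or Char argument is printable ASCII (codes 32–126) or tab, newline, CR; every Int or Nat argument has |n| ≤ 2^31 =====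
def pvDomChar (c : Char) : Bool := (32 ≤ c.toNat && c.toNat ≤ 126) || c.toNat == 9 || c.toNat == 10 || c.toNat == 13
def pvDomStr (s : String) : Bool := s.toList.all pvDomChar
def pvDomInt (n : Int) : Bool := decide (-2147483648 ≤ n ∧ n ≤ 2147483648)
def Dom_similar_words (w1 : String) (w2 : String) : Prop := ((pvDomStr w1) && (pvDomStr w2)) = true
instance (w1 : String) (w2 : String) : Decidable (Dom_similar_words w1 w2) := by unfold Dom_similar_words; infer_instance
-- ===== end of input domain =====

-- B replaces A's "collect all mismatching pairs, then test len==1" with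
-- "find the first mismatch, bulk-compare the suffixes, test the one pair" (alternative decomposition).

-- the SIMILAR constant (shared module context of both programs)
def similarList : List (Char × Char) :=
  [('a','e'), ('a','o'), ('b','d'), ('b','p'), ('c','k'), ('c','s'),
   ('d','p'), ('d','t'), ('e','i'), ('e','o'), ('f','v'), ('i','j'),
   ('i','y'), ('k','x'), ('m','n'), ('m','w'), ('n','u'), ('o','u'),
   ('s','x'), ('s','z'), ('u','v'), ('u','w'), ('v','w')]

-- ===== PORT A =====
-- A's for-loop over range(len(w1)) is the foldl over List.range; indices are
-- always in range there, so w1[i] is the in-range access List.getD i ' '.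
def similar_words (w1 : String) (w2 : String) : Bool :=
  if w1.toList.length ≠ w2.toList.length then false
  else if w1.toList = w2.toList then false
  else
    let diff := (List.range w1.toList.length).foldl
      (fun acc i =>
        if w1.toList.getD i ' ' ≠ w2.toList.getD i ' ' then
          acc ++ [if w1.toList.getD i ' ' < w2.toList.getD i ' ' then (w1.toList.getD i ' ', w2.toList.getD i ' ')
                  else (w2.toList.getD i ' ', w1.toList.getD i ' ')]
        else acc) []
    if diff.length = 1 then
      if similarList.contains diff[0]! then true else false
    else false

-- ===== PORT B =====
-- B's scan for the first mismatch (then bulk suffix compare) as structural recursion.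
def altGo : List Char → List Char → Bool
  | a :: t1, b :: t2 =>
      if a = b then altGo t1 t2
      else if t1 ≠ t2 then false
      else similarList.contains (if a < b then (a, b) else (b, a))
  | _, _ => false

def similar_words_alt (w1 : String) (w2 : String) : Bool :=
  if w1.toList.length ≠ w2.toList.length then false
  else altGo w1.toList w2.toList

-- ===== PRECONDITION & SPEC =====
def Spec_similar_words (w1 : String) (w2 : String) (out : Bool) : Prop := out = similar_words_alt w1 w2
instance (w1 : String) (w2 : String) (out : Bool) : Decidable (Spec_similar_words w1 w2 out) := by unfold Spec_similar_words; infer_instance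

-- ===== CLAIM (what is proved, stated in full; the proofs are below) =====
def Claim_equal_similar_words : Prop := ∀ (w1 : String) (w2 : String), Dom_similar_words w1 w2 → Spec_similar_words w1 w2 (similar_words w1 w2)

-- ===== LEMMAS AND PROOFS =====

-- the list of sorted mismatching pairs A's loop accumulates
def diffs : List Char → List Char → List (Char × Char)
  | a :: t1, b :: t2 =>
      (if a ≠ b then [if a < b then (a, b) else (b, a)] else []) ++ diffs t1 t2
  | _, _ => []

theorem diffs_fold (l1 : List Char) : ∀ (l2 : List Char) (acc : List (Char × Char)),
    l1.length = l2.length →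
    (List.range l1.length).foldl
      (fun acc i =>
        if l1.getD i ' ' ≠ l2.getD i ' ' then
          acc ++ [if l1.getD i ' ' < l2.getD i ' ' then (l1.getD i ' ', l2.getD i ' ')
                  else (l2.getD i ' ', l1.getD i ' ')]
        else acc) acc
    = acc ++ diffs l1 l2 := by
  induction l1 with
  | nil => intro l2 acc h; cases l2 <;> simp_all [diffs]
  | cons a t1 ih =>
    intro l2 acc h
    cases l2 with
    | nil => simp at h
    | cons b t2 =>
      simp only [List.length_cons] at h ⊢
      rw [List.range_succ_eq_map]
      simp only [List.foldl_cons, List.foldl_map, List.getD_cons_succ, List.getD_cons_zero]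
      rw [ih t2 _ (by omega)]
      by_cases hab : a = b <;> simp [diffs, hab]

theorem diffs_eq_nil_iff : ∀ (l1 l2 : List Char), l1.length = l2.length →
    (diffs l1 l2 = [] ↔ l1 = l2) := by
  intro l1
  induction l1 with
  | nil => intro l2 h; cases l2 <;> simp_all [diffs]
  | cons a t1 ih =>
    intro l2 h
    cases l2 with
    | nil => simp at h
    | cons b t2 =>
      simp only [List.length_cons] at h
      by_cases hab : a = b <;> simp [diffs, hab, ih t2 (by omega)]

theorem main_eq : ∀ (l1 l2 : List Char), l1.length = l2.length →
    (if l1 = l2 then false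
     else
       if (diffs l1 l2).length = 1 then
         if similarList.contains (diffs l1 l2)[0]! then true else false
       else false)
    = altGo l1 l2 := by
  intro l1
  induction l1 with
  | nil => intro l2 h; cases l2 <;> simp_all [altGo]
  | cons a t1 ih =>
    intro l2 h
    cases l2 with
    | nil => simp at h
    | cons b t2 =>
      simp only [List.length_cons] at h
      have ht : t1.length = t2.length := by omega
      by_cases hab : a = b
      · subst hab
        simp only [altGo, ← ih t2 ht]
        simp [diffs]
      · have hne : (a :: t1) ≠ (b :: t2) := by simp [hab]
        rw [if_neg hne]
        simp only [altGo, if_neg hab]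
        by_cases hts : t1 = t2
        · rw [if_neg (not_not_intro hts)]
          have hdn : diffs t1 t2 = [] := (diffs_eq_nil_iff t1 t2 ht).mpr hts
          simp [diffs, hab, hdn]
        · rw [if_pos hts]
          have hdn : diffs t1 t2 ≠ [] := fun hnil => hts ((diffs_eq_nil_iff t1 t2 ht).mp hnil)
          have h2 : (diffs (a :: t1) (b :: t2)).length ≠ 1 := by
            simp only [diffs, if_pos hab]
            cases hdt : diffs t1 t2 with
            | nil => exact absurd hdt hdn
            | cons x xs => simp
          rw [if_neg h2]

-- ===== VERDICT (by name: the statement is the Claim_ definition above) =====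
theorem similar_words_spec : Claim_equal_similar_words := by
  intro w1 w2 _
  unfold Spec_similar_words similar_words similar_words_alt
  by_cases hlen : w1.toList.length = w2.toList.length
  · rw [if_neg (not_not_intro hlen), if_neg (not_not_intro hlen)]
    rw [diffs_fold w1.toList w2.toList [] hlen, List.nil_append]
    exact main_eq w1.toList w2.toList hlen
  · rw [if_pos hlen, if_pos hlen]
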